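-- pv_equiv track=rewrite | github.com/Jesika312/alpro7 | pt7-3.py | cek_palindrome
-- ===== SOURCE A (Python) =====
-- def cek_palindrome(kalimat):
--     kalimat=kalimat.lower()
--
--     kalimat_bersih=''
--     for karakter in kalimat:
--         if karakter.isalpha():
--             kalimat_bersih=kalimat_bersih+karakter
--
--     kalimat_bersih_balik=kalimat_bersih[::-1]
--
--     if kalimat_bersih== kalimat_bersih_balik:
--         return True
--     else:
--         return False
-- ===== SOURCE B (Python) =====
-- def cek_palindrome(kalimat):
--     # shrink a char list from both ends, skipping non-alphabetic chars;
--     # no cleaned string and no reversed copy are ever built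
--     chars = list(kalimat.lower())
--     while len(chars) > 1:
--         if not chars[0].isalpha():
--             chars = chars[1:]
--         elif not chars[-1].isalpha():
--             chars = chars[:-1]
--         elif chars[0] != chars[-1]:
--             return False
--         else:
--             chars = chars[1:-1]
--     return True
-- ===== Notes on version B (the rewrite author's own statement) =====
-- stated objective: alternative
-- what changed: Instead of building the cleaned string by repeated concatenation, reversing it and comparing whole strings, B shrinks a character list from both ends, skipping non-alphabetic characters and comparing end pairs directly, never materialising a cleaned or reversed copy; it also returns False at the first mismatching pair.
import Mathlib
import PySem

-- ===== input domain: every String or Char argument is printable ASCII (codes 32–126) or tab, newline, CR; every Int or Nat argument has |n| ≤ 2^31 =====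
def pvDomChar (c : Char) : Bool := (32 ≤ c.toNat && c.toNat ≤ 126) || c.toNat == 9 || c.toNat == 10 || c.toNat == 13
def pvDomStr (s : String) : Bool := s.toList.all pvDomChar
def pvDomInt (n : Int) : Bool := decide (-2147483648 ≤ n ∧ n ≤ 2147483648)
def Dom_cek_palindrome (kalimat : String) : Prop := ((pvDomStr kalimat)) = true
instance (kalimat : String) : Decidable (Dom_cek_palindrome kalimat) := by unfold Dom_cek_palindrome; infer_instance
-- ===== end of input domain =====

-- B shrinks a char list from both ends instead of building a cleaned string and its reverse; alternative structure, same values.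

-- ===== PORT A =====
-- A lowers, builds the cleaned string char by char, reverses it with [::-1] and compares.
def cek_palindrome (kalimat : String) : Bool :=
  let kalimat := PySem.Str.lower kalimat
  let kalimat_bersih : List Char :=
    kalimat.toList.foldl (fun acc karakter =>
      if PySem.Chars.isalpha karakter then acc ++ [karakter] else acc) []
  -- kalimat_bersih[::-1]; step -1 ≠ 0, so slice? always returns some
  let kalimat_bersih_balik := (PySem.List.slice? kalimat_bersih none none (-1)).getD []
  if kalimat_bersih = kalimat_bersih_balik then true else false

-- ===== PORT B =====
-- B's while loop: the list of remaining chars shrinks from either end each iteration.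
def pvAltLoop : List Char → Bool
  | [] => true
  | [_] => true
  | c :: d :: rest =>
    if PySem.Chars.isalpha c = false then
      pvAltLoop (d :: rest)                          -- chars = chars[1:]
    else if PySem.Chars.isalpha ((d :: rest).getLast (by simp)) = false then
      pvAltLoop (c :: (d :: rest).dropLast)          -- chars = chars[:-1]
    else if c ≠ (d :: rest).getLast (by simp) then
      false
    else
      pvAltLoop ((d :: rest).dropLast)               -- chars = chars[1:-1]
  termination_by l => l.length
  decreasing_by all_goals simp

def cek_palindrome_alt (kalimat : String) : Bool :=
  pvAltLoop (PySem.Str.lower kalimat).toList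

-- ===== PRECONDITION & SPEC =====
def Spec_cek_palindrome (kalimat : String) (out : Bool) : Prop := out = cek_palindrome_alt kalimat
instance (kalimat : String) (out : Bool) : Decidable (Spec_cek_palindrome kalimat out) := by unfold Spec_cek_palindrome; infer_instance

-- ===== CLAIM (what is proved, stated in full; the proofs are below) =====
def Claim_equal_cek_palindrome : Prop := ∀ (kalimat : String), Dom_cek_palindrome kalimat → Spec_cek_palindrome kalimat (cek_palindrome kalimat)

-- ===== LEMMAS AND PROOFS =====

lemma pv_foldl_filter (l : List Char) (acc : List Char) :
    l.foldl (fun acc karakter =>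
      if PySem.Chars.isalpha karakter then acc ++ [karakter] else acc) acc
      = acc ++ l.filter PySem.Chars.isalpha := by
  induction l generalizing acc with
  | nil => simp
  | cons c t ih =>
    simp only [List.foldl, List.filter]
    by_cases h : PySem.Chars.isalpha c
    · simp [h, ih]
    · simp [h, ih]

lemma pv_sandwich (a b : Char) (m : List Char) :
    (a :: m ++ [b] = (a :: m ++ [b]).reverse) ↔ (a = b ∧ m = m.reverse) := by
  constructor
  · intro h
    rw [show (a :: m ++ [b]).reverse = b :: (m.reverse ++ [a]) by simp] at h
    obtain ⟨hab, htl⟩ := List.cons_eq_cons.mp h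
    subst hab
    exact ⟨rfl, List.append_cancel_right htl⟩
  · rintro ⟨rfl, hm⟩
    conv_lhs => rw [hm]
    simp

lemma pvAltLoop_eq (l : List Char) :
    pvAltLoop l = decide (l.filter PySem.Chars.isalpha = (l.filter PySem.Chars.isalpha).reverse) := by
  induction l using pvAltLoop.induct with
  | case1 => simp [pvAltLoop]
  | case2 c =>
    by_cases h : PySem.Chars.isalpha c <;> simp [pvAltLoop, List.filter, h]
  | case3 c d rest h ih =>
    rw [pvAltLoop, if_pos h, ih]
    simp [List.filter_cons, h]
  | case4 c d rest hc hl ih =>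
    have hc' : PySem.Chars.isalpha c = true := by
      cases hb : PySem.Chars.isalpha c
      · exact absurd hb hc
      · rfl
    have key : c :: d :: rest = (c :: (d :: rest).dropLast) ++ [(d :: rest).getLast (by simp)] := by
      rw [List.cons_append, List.dropLast_append_getLast]
    rw [pvAltLoop, if_neg hc, if_pos hl, ih]
    have hfilter : (c :: d :: rest).filter PySem.Chars.isalpha
        = (c :: (d :: rest).dropLast).filter PySem.Chars.isalpha := by
      conv_lhs => rw [key]
      rw [List.filter_append]
      simp [hl]
    rw [hfilter]
  | case5 c d rest hc hl hne =>
    have hc' : PySem.Chars.isalpha c = true := by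
      cases hb : PySem.Chars.isalpha c
      · exact absurd hb hc
      · rfl
    have hl' : PySem.Chars.isalpha ((d :: rest).getLast (by simp)) = true := by
      cases hb : PySem.Chars.isalpha ((d :: rest).getLast (by simp))
      · exact absurd hb hl
      · rfl
    have key : c :: d :: rest = (c :: (d :: rest).dropLast) ++ [(d :: rest).getLast (by simp)] := by
      rw [List.cons_append, List.dropLast_append_getLast]
    rw [pvAltLoop, if_neg hc, if_neg hl, if_pos hne]
    have hfl : (c :: d :: rest).filter PySem.Chars.isalpha
        = c :: ((d :: rest).dropLast.filter PySem.Chars.isalpha) ++ [(d :: rest).getLast (by simp)] := by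
      conv_lhs => rw [key]
      rw [List.filter_append]
      simp [hc', hl']
    rw [hfl]
    symm
    rw [decide_eq_false_iff_not]
    intro hpal
    exact hne ((pv_sandwich _ _ _).mp hpal).1
  | case6 c d rest hc hl hne ih =>
    have hc' : PySem.Chars.isalpha c = true := by
      cases hb : PySem.Chars.isalpha c
      · exact absurd hb hc
      · rfl
    have hl' : PySem.Chars.isalpha ((d :: rest).getLast (by simp)) = true := by
      cases hb : PySem.Chars.isalpha ((d :: rest).getLast (by simp))
      · exact absurd hb hl
      · rfl
    have key : c :: d :: rest = (c :: (d :: rest).dropLast) ++ [(d :: rest).getLast (by simp)] := by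
      rw [List.cons_append, List.dropLast_append_getLast]
    rw [pvAltLoop, if_neg hc, if_neg hl, if_neg hne, ih]
    have hfl : (c :: d :: rest).filter PySem.Chars.isalpha
        = c :: ((d :: rest).dropLast.filter PySem.Chars.isalpha) ++ [(d :: rest).getLast (by simp)] := by
      conv_lhs => rw [key]
      rw [List.filter_append]
      simp [hc', hl']
    have hceq : c = (d :: rest).getLast (by simp) := by
      by_contra hx
      exact hne hx
    rw [hfl, decide_eq_decide, pv_sandwich]
    simp [hceq]

lemma pv_A_eq (kalimat : String) :
    cek_palindrome kalimat
      = decide (((PySem.Str.lower kalimat).toList.filter PySem.Chars.isalpha)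
          = ((PySem.Str.lower kalimat).toList.filter PySem.Chars.isalpha).reverse) := by
  unfold cek_palindrome
  simp only [pv_foldl_filter, PySem.List.slice?_none_none_neg_one, Option.getD_some,
    List.nil_append, PySem.Str.toList_lower]
  split_ifs with h
  · exact (decide_eq_true h).symm
  · exact (decide_eq_false h).symm

-- ===== VERDICT (by name: the statement is the Claim_ definition above) =====
theorem cek_palindrome_spec : Claim_equal_cek_palindrome := by
  intro kalimat _
  unfold Spec_cek_palindrome cek_palindrome_alt
  rw [pv_A_eq, pvAltLoop_eq]
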